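-- pv_equiv track=rewrite | github.com/gmtev/SoftUniPythonFundamentals | Exercises/bitwise_operations.py | bit_solve
-- ===== SOURCE A (Python) =====
-- def bit_solve(number, digit):
--     count = 0
--     while number > 0:
--         remainder = number % 2
--         number = number // 2
--         if remainder == digit:
--             count += 1
--     return count
-- ===== SOURCE B (Python) =====
-- def bit_solve(number, digit):
--     if number <= 0:
--         return 0
--     if digit == 1:
--         return number.bit_count()
--     if digit == 0:
--         return number.bit_length() - number.bit_count()
--     return 0
-- ===== Notes on version B (the rewrite author's own statement) =====
-- stated objective: idiomatic
-- what changed: Replaces the digit-by-digit halving loop with closed-form calls to int.bit_count()/bit_length() (popcount for digit 1, length minus popcount for digit 0, 0 otherwise).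
import Mathlib
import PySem

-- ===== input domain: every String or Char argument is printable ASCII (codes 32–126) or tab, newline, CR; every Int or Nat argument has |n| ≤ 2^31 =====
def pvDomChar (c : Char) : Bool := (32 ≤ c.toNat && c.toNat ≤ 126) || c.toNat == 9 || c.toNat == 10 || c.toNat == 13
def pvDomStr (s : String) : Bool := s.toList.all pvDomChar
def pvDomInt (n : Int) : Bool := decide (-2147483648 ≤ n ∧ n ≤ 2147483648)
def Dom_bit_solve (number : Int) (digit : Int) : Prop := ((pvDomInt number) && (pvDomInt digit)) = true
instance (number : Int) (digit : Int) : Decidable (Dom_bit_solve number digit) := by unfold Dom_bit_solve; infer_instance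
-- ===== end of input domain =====

-- B replaces A's halving loop by closed-form bit_count()/bit_length() calls (idiomatic; speed not measured at these input sizes).

-- ===== PORT A =====
-- the while-loop of A: state (number, count), halving each iteration
def bitSolveLoop (number : Int) (digit : Int) (count : Int) : Int :=
  if h : number > 0 then
    let remainder := PySem.Int.mod number 2
    bitSolveLoop (PySem.Int.floordiv number 2) digit
      (if remainder = digit then count + 1 else count)
  else count
termination_by number.toNat
decreasing_by
  have h2 : PySem.Int.floordiv number 2 = number / 2 :=
    PySem.Int.floordiv_eq_ediv_of_pos (by norm_num)
  rw [h2]; omega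

def bit_solve (number : Int) (digit : Int) : Int :=
  bitSolveLoop number digit 0

-- ===== PORT B =====
def bit_solve_alt (number : Int) (digit : Int) : Int :=
  if number ≤ 0 then 0
  else if digit = 1 then (PySem.Int.bitCount number : Int)
  else if digit = 0 then (PySem.Int.bitLength number : Int) - (PySem.Int.bitCount number : Int)
  else 0

-- ===== PRECONDITION & SPEC =====
def Spec_bit_solve (number : Int) (digit : Int) (out : Int) : Prop := out = bit_solve_alt number digit
instance (number : Int) (digit : Int) (out : Int) : Decidable (Spec_bit_solve number digit out) := by unfold Spec_bit_solve; infer_instance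

-- ===== CLAIM (what is proved, stated in full; the proofs are below) =====
def Claim_equal_bit_solve : Prop := ∀ (number : Int) (digit : Int), Dom_bit_solve number digit → Spec_bit_solve number digit (bit_solve number digit)

-- ===== LEMMAS AND PROOFS =====

theorem bitSolveLoop_eq (n : Nat) :
    ∀ (number digit count : Int), number.toNat ≤ n →
      bitSolveLoop number digit count = count + bit_solve_alt number digit := by
  induction n with
  | zero =>
    intro number digit count hle
    have hnp : ¬ number > 0 := by omega
    rw [bitSolveLoop, dif_neg hnp]
    simp [bit_solve_alt, show number ≤ 0 by omega]
  | succ n ih =>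
    intro number digit count hle
    by_cases h : number > 0
    · rw [bitSolveLoop, dif_pos h]
      have h2 : PySem.Int.floordiv number 2 = number / 2 :=
        PySem.Int.floordiv_eq_ediv_of_pos (by norm_num)
      have hrec := ih (PySem.Int.floordiv number 2) digit
        (if PySem.Int.mod number 2 = digit then count + 1 else count)
        (by rw [h2]; omega)
      rw [hrec]
      have hm0 : 0 ≤ PySem.Int.mod number 2 := PySem.Int.mod_nonneg _ (by norm_num)
      have hm2 : PySem.Int.mod number 2 < 2 := PySem.Int.mod_lt _ (by norm_num)
      have hbc : PySem.Int.bitCount number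
          = (PySem.Int.mod number 2).toNat + PySem.Int.bitCount (PySem.Int.floordiv number 2) :=
        PySem.Int.bitCount_of_pos h
      have hbl : PySem.Int.bitLength number
          = PySem.Int.bitLength (PySem.Int.floordiv number 2) + 1 :=
        PySem.Int.bitLength_of_pos h
      -- the recursive argument: nonnegative; zero or positive
      by_cases hq : PySem.Int.floordiv number 2 ≤ 0
      · -- number' = 0
        have hq0 : PySem.Int.floordiv number 2 = 0 := by rw [h2] at hq ⊢; omega
        have hc0 : PySem.Int.bitCount (0 : Int) = 0 := by decide
        have hl0 : PySem.Int.bitLength (0 : Int) = 0 := by decide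
        rw [hq0] at hbc hbl
        simp only [bit_solve_alt, hq0, hc0, hl0, if_pos (le_refl (0:Int)),
          if_neg (not_le.mpr h)]
        rw [hbc, hbl]
        by_cases hd1 : digit = 1
        · subst hd1
          by_cases hm : PySem.Int.mod number 2 = 1 <;> simp [hm] <;> omega
        · by_cases hd0 : digit = 0
          · subst hd0
            by_cases hm : PySem.Int.mod number 2 = 0 <;> simp [hm] <;> omega
          · have hne : PySem.Int.mod number 2 ≠ digit := by omega
            have hme : PySem.Int.mod number 2 = number % 2 :=
              PySem.Int.mod_eq_emod_of_pos (by norm_num)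
            have hne' : ¬ number % 2 = digit := hme ▸ hne
            simp [hne, hne', hd1, hd0]
      · -- number' > 0
        have hq' : ¬ PySem.Int.floordiv number 2 ≤ 0 := hq
        simp only [bit_solve_alt, if_neg (not_le.mpr h), if_neg hq']
        rw [hbc, hbl]
        by_cases hd1 : digit = 1
        · subst hd1
          by_cases hm : PySem.Int.mod number 2 = 1 <;> simp [hm] <;> push_cast <;> omega
        · by_cases hd0 : digit = 0
          · subst hd0
            by_cases hm : PySem.Int.mod number 2 = 0 <;> simp [hm, hd1] <;> push_cast <;> omega
          · have hne : PySem.Int.mod number 2 ≠ digit := by omega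
            have hme : PySem.Int.mod number 2 = number % 2 :=
              PySem.Int.mod_eq_emod_of_pos (by norm_num)
            have hne' : ¬ number % 2 = digit := hme ▸ hne
            simp [hne, hne', hd1, hd0]
    · rw [bitSolveLoop, dif_neg h]
      simp [bit_solve_alt, show number ≤ 0 by omega]

-- ===== VERDICT (by name: the statement is the Claim_ definition above) =====
theorem bit_solve_spec : Claim_equal_bit_solve := by
  intro number digit _
  unfold Spec_bit_solve bit_solve
  rw [bitSolveLoop_eq number.toNat number digit 0 (le_refl _)]
  ring
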